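-- pv_equiv track=rewrite | github.com/korobopolly/codingchallenges | python.py | solution
-- ===== SOURCE A (Python) =====
-- def solution(want, number, discount):
--     list1 = list(zip(want, number))
--     answer = 0
--     k = 0
--     while(k+9<len(discount)):
--         dict = {}
--         for num in discount[k:k+10]:
--             if num in dict:
--                 dict[num] += 1
--             else:
--                 dict[num] = 1
--
--         is_valid = True
--         for i,j in list1:
--             if (dict.get(i,0) < j):
--                 is_valid = False
--                 break
--         if is_valid:
--             answer += 1
--         k += 1
--     return answer
-- ===== SOURCE B (Python) =====
-- def solution(want, number, discount):
--     # One prefix-count array per DISTINCT wanted item; each size-10 window is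
--     # tested by subtracting two prefix counts instead of rebuilding a counter dict.
--     n = len(discount)
--     if n < 10:
--         return 0
--     pref = {}
--     for w in want:
--         if w not in pref:
--             p = [0]
--             c = 0
--             for d in discount:
--                 if d == w:
--                     c += 1
--                 p.append(c)
--             pref[w] = p
--     reqs = [(pref[w], j) for w, j in zip(want, number)]
--     answer = 0
--     for k in range(n - 9):
--         if all(p[k + 10] - p[k] >= j for p, j in reqs):
--             answer += 1
--     return answer
-- ===== Notes on version B (the rewrite author's own statement) =====
-- stated objective: alternative
-- what changed: Replaces the per-window counter dict (rebuilt from a fresh slice for every window) by one prefix-count array per distinct wanted item, so each window is tested by subtracting two prefix counts per requirement.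
import Mathlib
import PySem

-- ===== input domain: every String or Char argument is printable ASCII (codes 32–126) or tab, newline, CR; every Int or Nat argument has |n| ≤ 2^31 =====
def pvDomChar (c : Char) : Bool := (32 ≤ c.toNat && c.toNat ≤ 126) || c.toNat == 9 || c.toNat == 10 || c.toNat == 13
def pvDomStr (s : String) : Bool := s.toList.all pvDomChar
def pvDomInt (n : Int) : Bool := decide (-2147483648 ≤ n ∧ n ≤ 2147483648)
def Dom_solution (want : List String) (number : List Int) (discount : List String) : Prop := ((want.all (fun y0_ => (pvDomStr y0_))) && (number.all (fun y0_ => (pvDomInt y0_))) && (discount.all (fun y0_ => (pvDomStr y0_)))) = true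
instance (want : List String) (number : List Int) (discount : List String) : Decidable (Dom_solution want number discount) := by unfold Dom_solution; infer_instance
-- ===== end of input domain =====

-- B replaces A's per-window counter dict by one prefix-count array per requirement
-- (window test = subtraction of two prefix counts); same result, different algorithm.

-- ===== PORT A =====
-- dict = {}; for num in discount[k:k+10]: if num in dict: dict[num] += 1 else: dict[num] = 1
def winDict (discount : List String) (k : Int) : PySem.Dict String Int :=
  (PySem.List.slice discount (some k) (some (k + 10))).foldl
    (fun d num => if (d.get? num).isSome then d.modify num 0 (· + 1) else d.insert num 1)
    PySem.Dict.empty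

-- for i,j in list1: if dict.get(i,0) < j: is_valid = False; break
def winValid (list1 : List (String × Int)) (discount : List String) (k : Int) : Bool :=
  list1.all (fun ij => !((winDict discount k).getD ij.1 0 < ij.2))

-- while(k+9<len(discount)): … ; k += 1
def solutionWhile (list1 : List (String × Int)) (discount : List String) (k answer : Int) : Int :=
  if h : k + 9 < (discount.length : Int) then
    solutionWhile list1 discount (k + 1) (if winValid list1 discount k then answer + 1 else answer)
  else answer
termination_by ((discount.length : Int) - k).toNat
decreasing_by omega

def solution (want : List String) (number : List Int) (discount : List String) : Int :=
  solutionWhile (want.zip number) discount 0 0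

-- ===== PORT B =====
-- p = [0]; c = 0; for d in discount: (if d == w: c += 1); p.append(c)
def buildPrefix (w : String) (discount : List String) : List Int :=
  (discount.foldl
    (fun (st : Int × List Int) d =>
      let c := if d == w then st.1 + 1 else st.1
      (c, st.2 ++ [c]))
    ((0 : Int), ([0] : List Int))).2

-- pref = {}; for w in want: if w not in pref: pref[w] = <prefix array of w>
def prefDict (want : List String) (discount : List String) : PySem.Dict String (List Int) :=
  want.foldl
    (fun d w => if (d.get? w).isSome then d else d.insert w (buildPrefix w discount))
    PySem.Dict.empty

-- indices k and k+10 are always within the prefix arrays (length n+1), so pyGetD's default is never used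
def solution_alt (want : List String) (number : List Int) (discount : List String) : Int :=
  let n : Int := (discount.length : Int)
  if n < 10 then 0
  else
    let pref := prefDict want discount
    let reqs := (want.zip number).map (fun wj => (pref.getD wj.1 [], wj.2))
    (PySem.List.pyRange 0 (n - 9) 1).foldl
      (fun answer k =>
        if reqs.all (fun pj =>
            decide (pj.2 ≤ PySem.List.pyGetD pj.1 (k + 10) 0 - PySem.List.pyGetD pj.1 k 0))
        then answer + 1 else answer)
      0

-- ===== PRECONDITION & SPEC =====
def Spec_solution (want : List String) (number : List Int) (discount : List String) (out : Int) : Prop := out = solution_alt want number discount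
instance (want : List String) (number : List Int) (discount : List String) (out : Int) : Decidable (Spec_solution want number discount out) := by unfold Spec_solution; infer_instance

-- ===== CLAIM (what is proved, stated in full; the proofs are below) =====
def Claim_equal_solution : Prop := ∀ (want : List String) (number : List Int) (discount : List String), Dom_solution want number discount → Spec_solution want number discount (solution want number discount)

-- ===== LEMMAS AND PROOFS =====

-- A's insert-or-bump dict step is exactly 'insert num (current + 1)'
theorem dictStep_eq (d : PySem.Dict String Int) (num : String) :
    (if (d.get? num).isSome then d.modify num 0 (· + 1) else d.insert num 1)
      = d.insert num (d.getD num 0 + 1) := by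
  by_cases h : (d.get? num).isSome
  · simp [h, PySem.Dict.modify]
  · simp [PySem.Dict.getD_eq_get?_getD, Option.not_isSome_iff_eq_none.mp h]

-- A's window dict is a counter: lookups are counts over the slice
theorem winDict_getD (discount : List String) (k : Int) (v : String) :
    (winDict discount k).getD v 0
      = ((PySem.List.slice discount (some k) (some (k + 10))).count v : Int) := by
  unfold winDict
  have hf : (fun (d : PySem.Dict String Int) num =>
        if (d.get? num).isSome then d.modify num 0 (· + 1) else d.insert num 1)
      = (fun d num => d.insert num (d.getD num 0 + 1)) :=
    funext fun d => funext fun num => dictStep_eq d num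
  rw [hf, PySem.Dict.getD_foldl_insert_add_one]
  simp

-- B's prefix array in closed form: entry i is the count in the first i elements
theorem prefixAux (w : String) :
    ∀ (l : List String) (c : Int) (acc : List Int),
      (l.foldl (fun (st : Int × List Int) d =>
          let c := if d == w then st.1 + 1 else st.1
          (c, st.2 ++ [c])) (c, acc)).2
        = acc ++ (List.range l.length).map (fun i => c + ((l.take (i + 1)).count w : Int)) := by
  intro l
  induction l with
  | nil => simp
  | cons d t ih =>
    intro c acc
    simp only [List.foldl_cons]
    rw [ih]
    simp only [List.length_cons, List.range_succ_eq_map, List.map_cons, List.map_map]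
    by_cases h : d = w
    · simp [h, List.take_succ_cons, List.append_assoc, Function.comp]
      intro i _; ring
    · simp [h, List.take_succ_cons, List.append_assoc, Function.comp]

theorem buildPrefix_eq (w : String) (l : List String) :
    buildPrefix w l
      = (List.range (l.length + 1)).map (fun i => ((l.take i).count w : Int)) := by
  unfold buildPrefix
  rw [prefixAux]
  simp [List.range_succ_eq_map, List.map_map, Function.comp]

theorem pyGetD_buildPrefix (l : List String) (w : String) (m : Nat) (h : m ≤ l.length) :
    PySem.List.pyGetD (buildPrefix w l) (m : Int) 0 = ((l.take m).count w : Int) := by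
  rw [buildPrefix_eq, PySem.List.pyGetD_natCast, List.getD_eq_getElem?_getD]
  simp [Nat.lt_succ_of_le h]

-- prefix-count subtraction = count in the window
theorem count_window (l : List String) (w : String) (m : Nat) :
    ((l.take (m + 10)).count w : Int) - ((l.take m).count w : Int)
      = (((l.drop m).take 10).count w : Int) := by
  rw [List.take_add, List.count_append]
  push_cast; ring

-- A's window test equals B's window test, at a window start m with m+10 ≤ n
theorem winValid_eq (list1 : List (String × Int)) (discount : List String) (m : Nat)
    (hm : m + 10 ≤ discount.length) :
    winValid list1 discount (m : Int)
      = list1.all (fun ij =>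
          decide (ij.2 ≤ PySem.List.pyGetD (buildPrefix ij.1 discount) ((m : Int) + 10) 0
                          - PySem.List.pyGetD (buildPrefix ij.1 discount) (m : Int) 0)) := by
  unfold winValid
  have hcast : ((m : Int) + 10) = ((m + 10 : Nat) : Int) := by push_cast; ring
  refine List.all_congr rfl (fun ij => ?_)
  rw [winDict_getD, hcast, pyGetD_buildPrefix _ _ _ hm,
      pyGetD_buildPrefix _ _ _ (by omega), count_window]
  have hs : PySem.List.slice discount (some (m : Int)) (some ((m + 10 : Nat) : Int))
      = (discount.drop m).take 10 := by
    rw [PySem.List.slice_natCast]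
    congr 1; omega
  rw [hs]
  simp [← decide_not, not_lt]

-- A's while loop counts the valid window starts
theorem loopA_eq (list1 : List (String × Int)) (discount : List String) (k answer : Int) :
    solutionWhile list1 discount k answer
      = answer + ((PySem.List.pyRange k ((discount.length : Int) - 9) 1).countP
          (fun x => winValid list1 discount x) : Int) := by
  fun_induction solutionWhile list1 discount k answer with
  | case1 k answer h ih =>
    rw [PySem.List.pyRange_one_cons (by omega)]
    by_cases hv : winValid list1 discount k <;>
      simp [hv] at ih ⊢ <;> omega
  | case2 k answer h =>
    rw [PySem.List.pyRange_one_eq_nil (by omega)]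
    simp

-- every stored prefix array is THE prefix array of its key
theorem prefDict_invariant (discount : List String) (ws : List String)
    (d : PySem.Dict String (List Int))
    (hd : ∀ w, (d.get? w).isSome → d.get? w = some (buildPrefix w discount)) :
    ∀ w, ((ws.foldl
        (fun d w => if (d.get? w).isSome then d else d.insert w (buildPrefix w discount))
        d).get? w).isSome →
      (ws.foldl
        (fun d w => if (d.get? w).isSome then d else d.insert w (buildPrefix w discount))
        d).get? w = some (buildPrefix w discount) := by
  induction ws generalizing d with
  | nil => exact hd
  | cons a t ih =>
    simp only [List.foldl_cons]
    apply ih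
    intro w hw
    by_cases ha : (d.get? a).isSome
    · simp only [ha, if_pos] at hw ⊢
      exact hd w hw
    · simp only [ha, Bool.false_eq_true, if_neg, not_false_iff] at hw ⊢
      by_cases hwa : w = a
      · subst hwa; simp [PySem.Dict.get?_insert_self]
      · rw [PySem.Dict.get?_insert_of_ne _ _ hwa] at hw ⊢
        exact hd w hw

theorem prefDict_mem (discount : List String) (ws : List String)
    (d : PySem.Dict String (List Int)) (w : String) (hw : w ∈ ws ∨ (d.get? w).isSome) :
    ((ws.foldl
        (fun d w => if (d.get? w).isSome then d else d.insert w (buildPrefix w discount))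
        d).get? w).isSome := by
  induction ws generalizing d with
  | nil => simpa using hw
  | cons a t ih =>
    simp only [List.foldl_cons]
    apply ih
    rcases hw with hw | hw
    · rcases List.mem_cons.mp hw with h | h
      · subst h
        right
        by_cases ha : (d.get? w).isSome
        · simp [ha]
        · simp [ha, PySem.Dict.get?_insert_self]
      · exact Or.inl h
    · right
      by_cases ha : (d.get? a).isSome
      · simpa [ha]
      · simp only [ha, Bool.false_eq_true, if_neg, not_false_iff]
        by_cases hwa : w = a
        · subst hwa; simp [PySem.Dict.get?_insert_self]
        · rw [PySem.Dict.get?_insert_of_ne _ _ hwa]; exact hw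

theorem prefDict_getD (want discount : List String) (w : String) (hw : w ∈ want) :
    (prefDict want discount).getD w [] = buildPrefix w discount := by
  have hs := prefDict_mem discount want PySem.Dict.empty w (Or.inl hw)
  have he := prefDict_invariant discount want PySem.Dict.empty
    (by intro w h; simp [PySem.Dict.get?_empty] at h) w hs
  unfold prefDict
  rw [PySem.Dict.getD_eq_get?_getD, he]
  rfl

-- all over a list, with pointwise equality only on members
theorem all_congr_mem {α : Type} (l : List α) (p q : α → Bool)
    (h : ∀ x ∈ l, p x = q x) : l.all p = l.all q := by
  induction l with
  | nil => rfl
  | cons a t ih =>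
    simp only [List.all_cons]
    rw [h a List.mem_cons_self, ih (fun x hx => h x (List.mem_cons_of_mem a hx))]

-- ===== VERDICT (by name: the statement is the Claim_ definition above) =====
theorem solution_spec : Claim_equal_solution := by
  intro want number discount _
  unfold Spec_solution solution solution_alt
  rw [loopA_eq]
  by_cases hlt : (discount.length : Int) < 10
  · rw [PySem.List.pyRange_one_eq_nil (by omega)]
    simp [hlt]
  · simp only [hlt]
    rw [PySem.List.foldl_if_add_one]
    congr 1
    congr 1
    apply List.countP_congr
    intro x hx
    have hmem := (PySem.List.mem_pyRange_one).mp hx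
    have hx0 : 0 ≤ x := hmem.1
    have hxn : x < (discount.length : Int) - 9 := hmem.2
    have hxm : x = ((x.toNat : Nat) : Int) := by omega
    rw [hxm, winValid_eq _ _ _ (by omega), List.all_map]
    constructor <;> intro h <;> rw [← h] <;> apply all_congr_mem <;>
      intro ij hij <;>
      rw [Function.comp_apply, prefDict_getD want discount ij.1 (List.of_mem_zip hij).1]
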